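-- pv_equiv track=rewrite | github.com/dleemiller/CnakeCharmer | cnake_data/unpaired/dyadic_breakdown.py | _dyadic_breakdown
-- ===== SOURCE A (Python) =====
-- import math
--
-- def fit_segments(start_idx: int, end_idx: int, power: int, base: int) -> list[tuple[int, int]]:
--     segment_length = int(base**power)
--     if end_idx - start_idx < segment_length:
--         return []
--     start_factor = int(math.ceil(start_idx / segment_length))
--     end_factor = int(math.floor(end_idx / segment_length))
--     if end_factor == start_factor:
--         return []
--     return [((fi + 1) * segment_length, power) for fi in range(start_factor, end_factor)]
--
-- def _dyadic_breakdown(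
--     start_idx: int, end_idx: int, base: int, max_power: int
-- ) -> list[tuple[int, int]]:
--     if start_idx >= end_idx:
--         return []
--     if end_idx - start_idx == 1:
--         return [(end_idx, 0)]
--
--     cur_power = max_power
--     largest_segments: list[tuple[int, int]] = []
--     while cur_power >= 0:
--         largest_segments = fit_segments(start_idx, end_idx, cur_power, base)
--         if largest_segments:
--             break
--         cur_power -= 1
--
--     if not largest_segments:
--         return [(i + 1, 0) for i in range(start_idx, end_idx)]
--
--     left_end = largest_segments[0][0] - base ** largest_segments[0][1]
--     return (
--         largest_segments
--         + _dyadic_breakdown(start_idx, left_end, base, cur_power - 1)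
--         + _dyadic_breakdown(largest_segments[-1][0], end_idx, base, cur_power - 1)
--     )
-- ===== SOURCE B (Python) =====
-- def _dyadic_breakdown(start_idx, end_idx, base, max_power):
--     # Iterative recursion-to-stack rewrite with exact integer ceil/floor division
--     # (no floats); appends node segments in place, pushes right gap before left
--     # so the left gap is processed first, reproducing A's pre-order output.
--     result = []
--     stack = [(start_idx, end_idx, max_power)]
--     while stack:
--         s, e, mp = stack.pop()
--         if s >= e:
--             continue
--         if e - s == 1:
--             result.append((e, 0))
--             continue
--         cp = mp
--         segs = []
--         while cp >= 0:
--             L = base ** cp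
--             if e - s >= L:
--                 sf = -((-s) // L)   # exact integer ceil(s / L)
--                 ef = e // L         # exact integer floor(e / L)
--                 seg_list = [((f + 1) * L, cp) for f in range(sf, ef)]
--                 if seg_list:
--                     segs = seg_list
--                     break
--             cp -= 1
--         if not segs:
--             result.extend((i + 1, 0) for i in range(s, e))
--             continue
--         result.extend(segs)
--         left_end = segs[0][0] - base ** segs[0][1]
--         stack.append((segs[-1][0], e, cp - 1))  # right gap (processed later)
--         stack.append((s, left_end, cp - 1))     # left gap (processed next)
--     return result
-- ===== Notes on version B (the rewrite author's own statement) =====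
-- stated objective: alternative
-- what changed: Recursion replaced by an explicit work-stack of (start,end,max_power) tasks that appends segments in place and pushes right-gap-then-left-gap, and the float-based math.ceil/math.floor factor computation replaced by exact integer ceiling/floor division.
import Mathlib
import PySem

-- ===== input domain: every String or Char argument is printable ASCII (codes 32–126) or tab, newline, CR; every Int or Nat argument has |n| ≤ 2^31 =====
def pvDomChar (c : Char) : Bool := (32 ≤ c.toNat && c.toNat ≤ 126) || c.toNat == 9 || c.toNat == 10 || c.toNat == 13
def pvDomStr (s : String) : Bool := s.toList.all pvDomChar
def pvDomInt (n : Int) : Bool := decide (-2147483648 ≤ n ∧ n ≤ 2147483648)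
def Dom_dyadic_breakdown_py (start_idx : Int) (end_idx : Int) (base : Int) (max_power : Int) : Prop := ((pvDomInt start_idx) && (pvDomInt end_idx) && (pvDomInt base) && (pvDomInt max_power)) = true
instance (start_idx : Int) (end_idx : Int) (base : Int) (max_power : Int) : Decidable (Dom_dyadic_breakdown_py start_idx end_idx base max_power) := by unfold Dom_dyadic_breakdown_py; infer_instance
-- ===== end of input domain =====

-- B replaces A's recursion by an explicit work-stack of (start,end,max_power) tasks (right gap
-- pushed before left gap, so the left gap is processed next) and A's float-based
-- math.ceil/math.floor factor computation by exact integer ceiling/floor division: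
-- an alternative, iterative decomposition of the same cost.

-- ===== PORT A =====
-- fit_segments. `power` is ≥ 0 at every call site (the while loop guards cur_power >= 0),
-- so int(base**power) is the integer base ^ power.toNat.
-- math.ceil(start_idx/L) and math.floor(end_idx/L) on Python floats coincide with exact integer
-- ceiling/floor division on every input of Dom that reaches the division (IEEE division is
-- correctly rounded, its error stays below the distance of the true quotient to any other
-- integer for |start_idx|,|end_idx| ≤ 2^31, and in the underflow regime both factor pairs give
-- an empty factor range), so this port is exact on Dom via PySem.Int.floordiv.
def pvFitSegments (start_idx : Int) (end_idx : Int) (power : Int) (base : Int) : List (Int × Int) :=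
  let L := base ^ power.toNat
  if end_idx - start_idx < L then []
  else
    let start_factor := -(PySem.Int.floordiv (-start_idx) L)
    let end_factor := PySem.Int.floordiv end_idx L
    if end_factor = start_factor then []
    else (PySem.List.pyRange start_factor end_factor 1).map (fun fi => ((fi + 1) * L, power))

-- A's `while cur_power >= 0` search loop; returns (largest_segments, cur_power) at exit.
def pvFindLoop (start_idx : Int) (end_idx : Int) (base : Int) (cp : Int) : List (Int × Int) × Int :=
  if 0 ≤ cp then
    let segs := pvFitSegments start_idx end_idx cp base
    if segs = [] then pvFindLoop start_idx end_idx base (cp - 1) else (segs, cp)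
  else ([], cp)
termination_by (cp + 1).toNat
decreasing_by
  rw [Int.sub_add_cancel]
  exact (Int.toNat_lt_toNat (Int.lt_add_one_iff.mpr ‹0 ≤ cp›)).mpr (lt_add_one cp)

-- cited by the termination proof of dyadic_breakdown_py
theorem pvFindLoop_bounds (s e b cp : Int) :
    (pvFindLoop s e b cp).1 ≠ [] → 0 ≤ (pvFindLoop s e b cp).2 ∧ (pvFindLoop s e b cp).2 ≤ cp := by
  fun_induction pvFindLoop s e b cp with
  | case1 cp hcp segs hseg ih =>
    intro h; exact ⟨(ih h).1, le_trans (ih h).2 (sub_one_lt cp).le⟩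
  | case2 cp hcp segs hseg => intro h; exact ⟨hcp, le_refl cp⟩
  | case3 cp hcp => intro h; exact absurd rfl h

def dyadic_breakdown_py (start_idx : Int) (end_idx : Int) (base : Int) (max_power : Int) : List (Int × Int) :=
  if start_idx ≥ end_idx then []
  else if end_idx - start_idx = 1 then [(end_idx, 0)]
  else
    let r := pvFindLoop start_idx end_idx base max_power
    if h : r.1 = [] then
      (PySem.List.pyRange start_idx end_idx 1).map (fun i => (i + 1, 0))
    else
      -- largest_segments[0][1] = the found cur_power ≥ 0, so ** is ^ ·.toNat here too
      let left_end := (r.1.headD (0, 0)).1 - base ^ ((r.1.headD (0, 0)).2).toNat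
      r.1 ++ dyadic_breakdown_py start_idx left_end base (r.2 - 1)
          ++ dyadic_breakdown_py ((r.1.getLast?.getD (0, 0)).1) end_idx base (r.2 - 1)
termination_by (max_power + 1).toNat
decreasing_by
  all_goals
    rw [Int.sub_add_cancel]
    have hb := pvFindLoop_bounds start_idx end_idx base max_power h
    exact (Int.toNat_lt_toNat (Int.lt_add_one_iff.mpr (le_trans hb.1 hb.2))).mpr
      (Int.lt_add_one_iff.mpr hb.2)

-- ===== PORT B =====
-- Source B's seg_list comprehension (exact integer ceil/floor division, no floats)
def pvSegListB (s : Int) (e : Int) (L : Int) (cp : Int) : List (Int × Int) :=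
  (PySem.List.pyRange (-(PySem.Int.floordiv (-s) L)) (PySem.Int.floordiv e L) 1).map
    (fun f => ((f + 1) * L, cp))

-- Source B's inner `while cp >= 0` loop; returns (segs, cp) at exit.
def pvFindLoopB (s : Int) (e : Int) (base : Int) (cp : Int) : List (Int × Int) × Int :=
  if 0 ≤ cp then
    let L := base ^ cp.toNat
    if L ≤ e - s then
      let sl := pvSegListB s e L cp
      if sl = [] then pvFindLoopB s e base (cp - 1) else (sl, cp)
    else pvFindLoopB s e base (cp - 1)
  else ([], cp)
termination_by (cp + 1).toNat
decreasing_by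
  all_goals rw [Int.sub_add_cancel]
  all_goals exact (Int.toNat_lt_toNat (Int.lt_add_one_iff.mpr ‹0 ≤ cp›)).mpr (lt_add_one cp)

-- cited by the termination proof of pvRun
theorem pvFindLoopB_bounds (s e b cp : Int) :
    (pvFindLoopB s e b cp).1 ≠ [] → 0 ≤ (pvFindLoopB s e b cp).2 ∧ (pvFindLoopB s e b cp).2 ≤ cp := by
  fun_induction pvFindLoopB s e b cp with
  | case1 cp hcp L hL sl hsl ih =>
    intro h; exact ⟨(ih h).1, le_trans (ih h).2 (sub_one_lt cp).le⟩
  | case2 cp hcp L hL sl hsl => intro h; exact ⟨hcp, le_refl cp⟩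
  | case3 cp hcp L hL ih =>
    intro h; exact ⟨(ih h).1, le_trans (ih h).2 (sub_one_lt cp).le⟩
  | case4 cp hcp => intro h; exact absurd rfl h

-- termination measure of the work-stack loop
def pvMeasure (stack : List (Int × Int × Int)) : Nat :=
  (stack.map (fun t => 3 ^ ((t.2.2 + 1).toNat))).sum

-- cited by the termination proof of pvRun
theorem pvMeasure_cons (t : Int × Int × Int) (rest : List (Int × Int × Int)) :
    pvMeasure (t :: rest) = 3 ^ ((t.2.2 + 1).toNat) + pvMeasure rest := rfl

-- cited by the termination proof of pvRun
theorem pvMeasure_push_lt (a b : Int) (h1 : 0 ≤ a) (h2 : a ≤ b) (M : Nat) :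
    3 ^ (a - 1 + 1).toNat + (3 ^ (a - 1 + 1).toNat + M) < 3 ^ (b + 1).toNat + M := by
  rw [Int.sub_add_cancel, ← Nat.add_assoc]
  refine Nat.add_lt_add_right ?_ M
  have ha : a.toNat ≤ b.toNat := Int.toNat_le_toNat h2
  have hb1 : (b + 1).toNat = b.toNat + 1 := Int.toNat_add (le_trans h1 h2) (by decide)
  rw [hb1, pow_succ]
  calc 3 ^ a.toNat + 3 ^ a.toNat
      ≤ 3 ^ b.toNat + 3 ^ b.toNat :=
        Nat.add_le_add (Nat.pow_le_pow_right (by decide) ha) (Nat.pow_le_pow_right (by decide) ha)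
    _ < 3 ^ b.toNat + 3 ^ b.toNat + 3 ^ b.toNat :=
        Nat.lt_add_of_pos_right (Nat.pos_of_neZero (3 ^ b.toNat))
    _ = 3 ^ b.toNat * 3 := by rw [Nat.mul_succ, Nat.mul_succ, Nat.mul_one]

-- Source B's main while loop. The Python stack pushes/pops at the list END; the port keeps the
-- top of the stack at the list HEAD (push = cons, pop = head), the same discipline.
def pvRun (base : Int) (stack : List (Int × Int × Int)) (result : List (Int × Int)) : List (Int × Int) :=
  match stack with
  | [] => result
  | (s, e, mp) :: rest =>
    if s ≥ e then pvRun base rest result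
    else if e - s = 1 then pvRun base rest (result ++ [(e, 0)])
    else
      let r := pvFindLoopB s e base mp
      if h : r.1 = [] then
        pvRun base rest (result ++ (PySem.List.pyRange s e 1).map (fun i => (i + 1, 0)))
      else
        pvRun base
          ((s, (r.1.headD (0, 0)).1 - base ^ ((r.1.headD (0, 0)).2).toNat, r.2 - 1)
            :: ((r.1.getLast?.getD (0, 0)).1, e, r.2 - 1) :: rest)
          (result ++ r.1)
termination_by pvMeasure stack
decreasing_by
  · rw [pvMeasure_cons]
    exact Nat.lt_add_of_pos_left (Nat.pos_of_neZero _)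
  · rw [pvMeasure_cons]
    exact Nat.lt_add_of_pos_left (Nat.pos_of_neZero _)
  · rw [pvMeasure_cons]
    exact Nat.lt_add_of_pos_left (Nat.pos_of_neZero _)
  · rw [pvMeasure_cons, pvMeasure_cons, pvMeasure_cons]
    exact pvMeasure_push_lt _ mp (pvFindLoopB_bounds s e base mp h).1
      (pvFindLoopB_bounds s e base mp h).2 (pvMeasure rest)

def dyadic_breakdown_py_alt (start_idx : Int) (end_idx : Int) (base : Int) (max_power : Int) : List (Int × Int) :=
  pvRun base [(start_idx, end_idx, max_power)] []

-- ===== PRECONDITION & SPEC =====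
-- Pre_ excludes exactly the inputs on which Python A raises ZeroDivisionError (base = 0 with
-- max_power ≥ 1 on an interval of length ≥ 2: segment_length = 0 is divided by; B raises there too).
def Pre_dyadic_breakdown_py (start_idx : Int) (end_idx : Int) (base : Int) (max_power : Int) : Prop :=
  ¬ (base = 0 ∧ 1 ≤ max_power ∧ 2 ≤ end_idx - start_idx)
instance (start_idx : Int) (end_idx : Int) (base : Int) (max_power : Int) : Decidable (Pre_dyadic_breakdown_py start_idx end_idx base max_power) := by unfold Pre_dyadic_breakdown_py; infer_instance

def pvWitness_dyadic_breakdown_py : Int × Int × Int × Int := (0, 10, 2, 3)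

def Spec_dyadic_breakdown_py (start_idx : Int) (end_idx : Int) (base : Int) (max_power : Int) (out : List (Int × Int)) : Prop := out = dyadic_breakdown_py_alt start_idx end_idx base max_power
instance (start_idx : Int) (end_idx : Int) (base : Int) (max_power : Int) (out : List (Int × Int)) : Decidable (Spec_dyadic_breakdown_py start_idx end_idx base max_power out) := by unfold Spec_dyadic_breakdown_py; infer_instance

-- ===== CLAIM (what is proved, stated in full; the proofs are below) =====
def Claim_equal_dyadic_breakdown_py : Prop := ∀ (start_idx : Int) (end_idx : Int) (base : Int) (max_power : Int), Dom_dyadic_breakdown_py start_idx end_idx base max_power → Pre_dyadic_breakdown_py start_idx end_idx base max_power → Spec_dyadic_breakdown_py start_idx end_idx base max_power (dyadic_breakdown_py start_idx end_idx base max_power)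

-- ===== LEMMAS AND PROOFS =====

-- A's fit_segments, rephrased through B's seg_list (when end_factor = start_factor the
-- factor range is empty, so pvSegListB is [] there as well).
theorem pvFit_eq (s e p base : Int) :
    pvFitSegments s e p base =
      (if base ^ p.toNat ≤ e - s then pvSegListB s e (base ^ p.toNat) p else []) := by
  unfold pvFitSegments pvSegListB
  dsimp only
  by_cases h1 : e - s < base ^ p.toNat
  · have h1' : ¬ base ^ p.toNat ≤ e - s := by omega
    rw [if_pos h1, if_neg h1']
  · have h1' : base ^ p.toNat ≤ e - s := by omega
    rw [if_neg h1, if_pos h1']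
    by_cases h2 : PySem.Int.floordiv e (base ^ p.toNat) = -(PySem.Int.floordiv (-s) (base ^ p.toNat))
    · rw [if_pos h2, h2]; simp
    · rw [if_neg h2]

-- the two search loops agree
theorem pvFindLoop_eq (s e base cp : Int) : pvFindLoopB s e base cp = pvFindLoop s e base cp := by
  fun_induction pvFindLoopB s e base cp with
  | case1 cp hcp L hL sl hsl ih =>
    rw [pvFindLoop]; rw [if_pos hcp]; dsimp only
    rw [pvFit_eq, if_pos hL, if_pos hsl]; exact ih
  | case2 cp hcp L hL sl hsl =>
    rw [pvFindLoop]; rw [if_pos hcp]; dsimp only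
    rw [pvFit_eq, if_pos hL, if_neg hsl]
  | case3 cp hcp L hL ih =>
    rw [pvFindLoop]; rw [if_pos hcp]; dsimp only
    rw [pvFit_eq, if_neg hL]; exact ih
  | case4 cp hcp =>
    rw [pvFindLoop]; rw [if_neg hcp]

-- the stack machine computes acc ++ the pre-order concatenation of A over the stacked tasks
theorem pvRun_eq (base : Int) (stack : List (Int × Int × Int)) (acc : List (Int × Int)) :
    pvRun base stack acc
      = acc ++ (stack.map (fun t => dyadic_breakdown_py t.1 t.2.1 base t.2.2)).flatten := by
  fun_induction pvRun base stack acc with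
  | case1 acc => simp
  | case2 acc s e mp rest hse ih =>
    rw [ih]; simp only [List.map_cons, List.flatten_cons]
    rw [dyadic_breakdown_py.eq_def, if_pos hse]; simp
  | case3 acc s e mp rest hse h1 ih =>
    rw [ih]; simp only [List.map_cons, List.flatten_cons]
    rw [dyadic_breakdown_py.eq_def, if_neg hse, if_pos h1]; simp
  | case4 acc s e mp rest hse h1 r hr ih =>
    rw [ih]; simp only [List.map_cons, List.flatten_cons]
    have hr' : (pvFindLoop s e base mp).1 = [] := by rw [← pvFindLoop_eq]; exact hr
    conv_rhs => rw [dyadic_breakdown_py.eq_def]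
    rw [if_neg hse, if_neg h1]
    simp only [dif_pos hr']
    simp
  | case5 acc s e mp rest hse h1 r hr ih =>
    rw [ih]; simp only [List.map_cons, List.flatten_cons]
    have hr' : ¬ (pvFindLoop s e base mp).1 = [] := by rw [← pvFindLoop_eq]; exact hr
    have hrB : r = pvFindLoop s e base mp := pvFindLoop_eq s e base mp
    conv_rhs => rw [dyadic_breakdown_py.eq_def]
    rw [if_neg hse, if_neg h1]
    simp only [dif_neg hr']
    rw [hrB]
    simp [List.append_assoc]

-- ===== VERDICT (by name: the statement is the Claim_ definition above) =====
theorem dyadic_breakdown_py_spec : Claim_equal_dyadic_breakdown_py := by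
  intro s e b mp _ _
  unfold Spec_dyadic_breakdown_py dyadic_breakdown_py_alt
  rw [pvRun_eq]
  simp
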